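-- pv_equiv track=rewrite | github.com/radoslawczapp/MacoTask | app.py | prepare_order
-- ===== SOURCE A (Python) =====
-- from typing import Dict
-- from math import ceil
--
-- def prepare_order(qty: int) -> Dict[str, int]:
--     """
--     This function takes quantity of an order and returns number of boxes and size of boxes
--     you need to prepare to pack this order.
--     :param qty: The quantity of an order.
--     :return: Number and size of boxes you need to pack in the order.
--     """
--     orders = {}
--
--     small = 0
--     medium = 0
--     large = 0
--     total = 0
--
--     while qty > 0:
--         if qty <= 3:
--             small += 1
--             break
--         elif qty <= 6:
--             medium += 1
--             break
--         elif qty <= 9: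
--             large += 1
--             break
--         else:
--             large += qty // 9
--             qty %= 9
--
--     orders["small"] = small
--     orders["medium"] = medium
--     orders["large"] = large
--
--     boxes_sum = small + medium + large
--
--     if boxes_sum > 1:
--         total = ceil(boxes_sum/3)
--
--     orders['total'] = total
--
--     return orders
-- ===== SOURCE B (Python) =====
-- def prepare_order(qty: int) -> dict:
--     """Branch-free last-box formulation: no while-loop and no size-classification
--     branch chain; the final (possibly partial) box's item count k = (qty-1) % 9 + 1
--     picks its size class by table index (k-1)//3, and the remaining qty-k items are
--     full large boxes."""
--     counts = [0, 0, 0]  # small, medium, large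
--     if qty > 0:
--         last = (qty - 1) % 9 + 1          # items in the final box, 1..9
--         counts[(last - 1) // 3] = 1       # 0 -> small, 1 -> medium, 2 -> large
--         counts[2] += (qty - last) // 9    # full large boxes before it
--     boxes = sum(counts)
--     total = -(-boxes // 3) if boxes > 1 else 0
--     return dict(zip(("small", "medium", "large", "total"), counts + [total]))
-- ===== Notes on version B (the rewrite author's own statement) =====
-- stated objective: alternative
-- what changed: Replaces A's while-loop with remainder-classification branch chain by a branch-free 'last box' formulation: the final box size k=(qty-1)%9+1 indexes a 3-slot counts table via (k-1)//3, the remaining (qty-k)//9 are full large boxes, and the dict is assembled once by zipping names with the counts list.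
import Mathlib
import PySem

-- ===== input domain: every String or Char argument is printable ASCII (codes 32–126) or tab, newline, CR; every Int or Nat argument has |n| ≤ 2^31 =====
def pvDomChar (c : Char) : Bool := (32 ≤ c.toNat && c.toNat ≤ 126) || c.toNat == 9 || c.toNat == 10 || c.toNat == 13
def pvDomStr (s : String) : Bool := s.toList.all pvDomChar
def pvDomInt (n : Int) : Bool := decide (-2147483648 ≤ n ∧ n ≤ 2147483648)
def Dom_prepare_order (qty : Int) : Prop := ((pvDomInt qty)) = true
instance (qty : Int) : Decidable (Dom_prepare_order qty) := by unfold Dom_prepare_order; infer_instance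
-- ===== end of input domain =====

-- B replaces A's while-loop and branch chain by a branch-free "last box" table formulation (objective: alternative).

-- ===== PORT A =====
-- literal port of A's while-loop: state (qty, small, medium, large); branches in source order
def prepareOrderLoopA (qty small medium large : Int) : Int × Int × Int :=
  if qty > 0 then
    if qty ≤ 3 then (small + 1, medium, large)
    else if qty ≤ 6 then (small, medium + 1, large)
    else if qty ≤ 9 then (small, medium, large + 1)
    else prepareOrderLoopA (PySem.Int.mod qty 9) small medium (large + PySem.Int.floordiv qty 9)
  else (small, medium, large)
termination_by qty.toNat
decreasing_by
  have h1 : 0 ≤ PySem.Int.mod qty 9 := PySem.Int.mod_nonneg qty (by norm_num)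
  have h2 : PySem.Int.mod qty 9 < 9 := PySem.Int.mod_lt qty (by norm_num)
  omega

def prepare_order (qty : Int) : List (String × Int) :=
  let (small, medium, large) := prepareOrderLoopA qty 0 0 0
  let boxes_sum := small + medium + large
  -- ceil(boxes_sum/3): math.ceil of the float division, exact here as the integer ceiling -((-s)//3)
  let total : Int := if boxes_sum > 1 then -(PySem.Int.floordiv (-boxes_sum) 3) else 0
  (((((PySem.Dict.empty : PySem.Dict String Int).insert "small" small).insert
      "medium" medium).insert "large" large).insert "total" total).items

-- ===== PORT B =====
-- port of Source B: 3-slot counts list, last-box index assignment, zip with the key names.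
-- the list indices (last-1)//3 ∈ {0,1,2} and 2 are provably in range, so List.set/getD are exact.
def prepare_order_alt (qty : Int) : List (String × Int) :=
  let counts : List Int := [0, 0, 0]
  let counts :=
    if qty > 0 then
      let last := PySem.Int.mod (qty - 1) 9 + 1
      let counts := counts.set (PySem.Int.floordiv (last - 1) 3).toNat 1
      counts.set 2 (counts.getD 2 0 + PySem.Int.floordiv (qty - last) 9)
    else counts
  let boxes := counts.foldl (· + ·) 0
  let total : Int := if boxes > 1 then -(PySem.Int.floordiv (-boxes) 3) else 0
  List.zip ["small", "medium", "large", "total"] (counts ++ [total])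

-- ===== PRECONDITION & SPEC =====
def Spec_prepare_order (qty : Int) (out : List (String × Int)) : Prop := out = prepare_order_alt qty
instance (qty : Int) (out : List (String × Int)) : Decidable (Spec_prepare_order qty out) := by unfold Spec_prepare_order; infer_instance

-- ===== CLAIM (what is proved, stated in full; the proofs are below) =====
def Claim_equal_prepare_order : Prop := ∀ (qty : Int), Dom_prepare_order qty → Spec_prepare_order qty (prepare_order qty)

-- ===== LEMMAS AND PROOFS =====

-- the loop from the all-zero start state, as a case split on qty (in terms of Int ediv/emod, divisor 9 > 0)
theorem prepareOrderLoopA_char (qty : Int) :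
    prepareOrderLoopA qty 0 0 0 =
      if qty ≤ 0 then (0, 0, 0)
      else if qty ≤ 3 then (1, 0, 0)
      else if qty ≤ 6 then (0, 1, 0)
      else if qty ≤ 9 then (0, 0, 1)
      else if qty % 9 = 0 then (0, 0, qty / 9)
      else if qty % 9 ≤ 3 then (1, 0, qty / 9)
      else if qty % 9 ≤ 6 then (0, 1, qty / 9)
      else (0, 0, qty / 9 + 1) := by
  have hf : ∀ a : Int, PySem.Int.floordiv a 9 = a / 9 :=
    fun a => PySem.Int.floordiv_eq_ediv_of_pos (by norm_num)
  have hm : ∀ a : Int, PySem.Int.mod a 9 = a % 9 :=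
    fun a => PySem.Int.mod_eq_emod_of_pos (by norm_num)
  rw [prepareOrderLoopA, prepareOrderLoopA]
  simp only [hf, hm]
  have hb : 0 ≤ qty % 9 ∧ qty % 9 < 9 := ⟨Int.emod_nonneg qty (by norm_num), Int.emod_lt_of_pos qty (by norm_num)⟩
  split_ifs <;> first
    | rfl
    | omega
    | (simp only [Prod.mk.injEq, and_true, true_and]; omega)

-- the four distinct-key inserts on an empty dict, as a literal items list
theorem dict4_items (s m l t : Int) :
    (((((PySem.Dict.empty : PySem.Dict String Int).insert "small" s).insert
        "medium" m).insert "large" l).insert "total" t).items =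
      [("small", s), ("medium", m), ("large", l), ("total", t)] := by
  simp [PySem.Dict.items_insert, PySem.Dict.contains_insert, PySem.Dict.contains_empty,
        PySem.Dict.empty, PySem.Dict.items]

-- B in the same case-split form: split on the last-box index (qty-1)%9 / 3 ∈ {0,1,2}
theorem prepare_order_alt_char (qty : Int) :
    prepare_order_alt qty =
      let (small, medium, large) :=
        if qty ≤ 0 then ((0:Int), (0:Int), (0:Int))
        else if (qty - 1) % 9 ≤ 2 then (1, 0, (qty - ((qty - 1) % 9 + 1)) / 9)
        else if (qty - 1) % 9 ≤ 5 then (0, 1, (qty - ((qty - 1) % 9 + 1)) / 9)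
        else (0, 0, 1 + (qty - ((qty - 1) % 9 + 1)) / 9)
      let boxes := small + medium + large
      let total : Int := if boxes > 1 then -((-boxes) / 3) else 0
      [("small", small), ("medium", medium), ("large", large), ("total", total)] := by
  have hf3 : ∀ a : Int, PySem.Int.floordiv a 3 = a / 3 :=
    fun a => PySem.Int.floordiv_eq_ediv_of_pos (by norm_num)
  have hf9 : ∀ a : Int, PySem.Int.floordiv a 9 = a / 9 :=
    fun a => PySem.Int.floordiv_eq_ediv_of_pos (by norm_num)
  have hm9 : ∀ a : Int, PySem.Int.mod a 9 = a % 9 :=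
    fun a => PySem.Int.mod_eq_emod_of_pos (by norm_num)
  unfold prepare_order_alt
  simp only [hf3, hf9, hm9]
  have hb : 0 ≤ (qty - 1) % 9 ∧ (qty - 1) % 9 < 9 :=
    ⟨Int.emod_nonneg _ (by norm_num), Int.emod_lt_of_pos _ (by norm_num)⟩
  by_cases h0 : qty ≤ 0
  · simp [h0, show ¬ qty > 0 by omega, List.foldl]
  · have hpos : qty > 0 := by omega
    simp only [hpos, if_pos, if_neg h0]
    -- fix the table index
    by_cases h2 : (qty - 1) % 9 ≤ 2
    · have hidx : ((qty - 1) % 9) / 3 = 0 := by omega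
      simp [hidx, h2, List.foldl]
    · by_cases h5 : (qty - 1) % 9 ≤ 5
      · have hidx : ((qty - 1) % 9) / 3 = 1 := by omega
        simp [hidx, h2, h5, List.foldl]
      · have hidx : ((qty - 1) % 9) / 3 = 2 := by omega
        simp [hidx, h2, h5, List.foldl]

-- ===== VERDICT (by name: the statement is the Claim_ definition above) =====
set_option maxHeartbeats 1000000 in
theorem prepare_order_spec : Claim_equal_prepare_order := by
  intro qty _
  unfold Spec_prepare_order prepare_order
  have hf3 : ∀ a : Int, PySem.Int.floordiv a 3 = a / 3 :=
    fun a => PySem.Int.floordiv_eq_ediv_of_pos (by norm_num)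
  rw [prepareOrderLoopA_char, prepare_order_alt_char]
  simp only [hf3, dict4_items]
  have hb : 0 ≤ qty % 9 ∧ qty % 9 < 9 :=
    ⟨Int.emod_nonneg qty (by norm_num), Int.emod_lt_of_pos qty (by norm_num)⟩
  have hb' : 0 ≤ (qty - 1) % 9 ∧ (qty - 1) % 9 < 9 :=
    ⟨Int.emod_nonneg _ (by norm_num), Int.emod_lt_of_pos _ (by norm_num)⟩
  split_ifs <;>
    simp only [List.cons.injEq, Prod.mk.injEq, eq_self_iff_true, true_and, and_true] <;>
    omega
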